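-- pv_equiv track=rewrite | github.com/pikesley/light-emitting-desk | light_modes.py | divergence_sequence_for_sectors
-- ===== SOURCE A (Python) =====
-- def pairs_from_list(lights):
--     """Generate a list of pairs to enable from-each-end lighting."""
--     length = len(lights)
--     half = int(length / 2)
--     offset = 0
--
--     centre = None
--     if length % 2 == 1:
--         centre = lights[half]
--         offset = 1
--
--     left = lights[:half]
--
--     rh_start = half + offset
--     right = reversed(lights[rh_start:])
--
--     pairs = list(map(list, zip(left, right)))
--
--     if centre:
--         pairs.append([centre])
--
--     return pairs
--
-- def divergence_sequence_for_sectors(sectors):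
--     """Generate a sequence for divergent lighting per-sector."""
--     sequence = []
--     pairs = map(pairs_from_list, sectors)
--     for items in pairs:
--         for j, pair in enumerate(reversed(items)):
--             try:
--                 sequence[j].extend(pair)
--             except IndexError:
--                 sequence.append(pair)
--
--     # sort the member lists
--     return list(map(sorted, sequence))
-- ===== SOURCE B (Python) =====
-- from itertools import groupby
--
--
-- def pairs_from_list(lights):
--     """Generate a list of pairs to enable from-each-end lighting."""
--     length = len(lights)
--     half = int(length / 2)
--     offset = 0
--
--     centre = None
--     if length % 2 == 1:
--         centre = lights[half]
--         offset = 1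
--
--     left = lights[:half]
--
--     rh_start = half + offset
--     right = reversed(lights[rh_start:])
--
--     pairs = list(map(list, zip(left, right)))
--
--     if centre:
--         pairs.append([centre])
--
--     return pairs
--
--
-- def divergence_sequence_for_sectors(sectors):
--     """Generate a sequence for divergent lighting per-sector."""
--     tagged = sorted((j, light)
--                     for sector in sectors
--                     for j, pair in enumerate(reversed(pairs_from_list(sector)))
--                     for light in pair)
--     return [[light for _, light in group]
--             for _, group in groupby(tagged, key=lambda tag: tag[0])]
-- ===== Notes on version B (the rewrite author's own statement) =====
-- stated objective: alternative
-- what changed: B keeps the module's pairs_from_list helper but replaces the exception-driven per-column extend-or-append merge and the per-column sorts with one global lexicographic sort of (bucket, light) tags followed by a single groupby pass over the sorted tags.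
import Mathlib
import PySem

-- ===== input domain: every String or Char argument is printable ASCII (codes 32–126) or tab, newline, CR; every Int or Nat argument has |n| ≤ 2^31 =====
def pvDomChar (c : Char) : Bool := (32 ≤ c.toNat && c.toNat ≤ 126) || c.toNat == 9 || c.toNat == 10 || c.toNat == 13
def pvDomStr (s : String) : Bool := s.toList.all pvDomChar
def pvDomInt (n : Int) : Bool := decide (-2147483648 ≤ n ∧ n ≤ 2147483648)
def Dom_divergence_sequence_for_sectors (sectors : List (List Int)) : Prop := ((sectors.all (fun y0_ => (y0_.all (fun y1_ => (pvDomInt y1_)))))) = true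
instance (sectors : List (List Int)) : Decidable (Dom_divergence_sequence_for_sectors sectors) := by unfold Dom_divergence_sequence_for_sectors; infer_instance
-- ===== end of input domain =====

-- B keeps the module's pairs_from_list helper but replaces the exception-driven per-column
-- extend-or-append merge and the per-column sorts with one global lexicographic sort of
-- (bucket, light) tags followed by a single grouping pass; objective: alternative, same cost.

-- ===== PORT A =====
-- pairs_from_list: int(length/2) = length // 2 here (length ≥ 0, far below float precision loss)
def pairsFromList (lights : List Int) : List (List Int) :=
  let length := lights.length
  let half := length / 2
  -- centre = None / lights[half] (index always in range when length is odd), offset 0 / 1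
  let co : Option Int × Nat :=
    if length % 2 == 1 then (some (lights.getD half 0), 1) else (none, 0)
  let left := lights.take half                             -- lights[:half]
  let right := (lights.drop (half + co.2)).reverse         -- reversed(lights[rh_start:])
  let pairs := (left.zip right).map (fun p => [p.1, p.2])  -- list(map(list, zip(left, right)))
  match co.1 with
  | some c => if c ≠ 0 then pairs ++ [[c]] else pairs      -- `if centre:` — truthy int
  | none => pairs

-- try: sequence[j].extend(pair) except IndexError: sequence.append(pair)
-- (the enumerate counter is ≥ 0, so .toNat is exact)
def dsStep (seq : List (List Int)) (jp : Int × List Int) : List (List Int) :=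
  let j := jp.1.toNat
  if h : j < seq.length then seq.set j (seq[j] ++ jp.2) else seq ++ [jp.2]

def divergence_sequence_for_sectors (sectors : List (List Int)) : List (List Int) :=
  let pairs := sectors.map pairsFromList
  let sequence := pairs.foldl
    (fun seq items => (PySem.List.enumerate items.reverse 0).foldl dsStep seq) []
  sequence.map (fun l => PySem.List.sorted l (fun x => x) false)

-- ===== PORT B =====
-- Source B carries a verbatim copy of the module's pairs_from_list, so the transliteration
-- pairsFromList above serves both ports.

-- itertools.groupby(tagged, key=tag[0]) consumed into a list of groups: maximal runs of
-- equal first components (ported by hand, exact for any list of pairs)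
def pyGroupRuns : List (Int × Int) → List (List (Int × Int))
  | [] => []
  | x :: xs =>
      (x :: (xs.span (fun y => y.1 == x.1)).1) :: pyGroupRuns (xs.span (fun y => y.1 == x.1)).2
  termination_by l => l.length
  decreasing_by
    simp only [List.span_eq_takeWhile_dropWhile]
    have := List.length_dropWhile_le (fun (y : Int × Int) => y.1 == x.1) xs
    simp only [List.length_cons]
    omega

def divergence_sequence_for_sectors_alt (sectors : List (List Int)) : List (List Int) :=
  -- sorted(...) of the (j, light) generator: Python sorts the 2-tuples lexicographically
  let tagged := PySem.List.sorted2
    (sectors.flatMap (fun sector =>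
      (PySem.List.enumerate (pairsFromList sector).reverse 0).flatMap (fun jp =>
        jp.2.map (fun light => (jp.1, light)))))
    (fun t => t.1) (fun t => t.2) false
  (pyGroupRuns tagged).map (fun grp => grp.map (fun t => t.2))

-- ===== PRECONDITION & SPEC =====
def Spec_divergence_sequence_for_sectors (sectors : List (List Int)) (out : List (List Int)) : Prop := out = divergence_sequence_for_sectors_alt sectors
instance (sectors : List (List Int)) (out : List (List Int)) : Decidable (Spec_divergence_sequence_for_sectors sectors out) := by unfold Spec_divergence_sequence_for_sectors; infer_instance

-- ===== CLAIM (what is proved, stated in full; the proofs are below) =====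
def Claim_equal_divergence_sequence_for_sectors : Prop := ∀ (sectors : List (List Int)), Dom_divergence_sequence_for_sectors sectors → Spec_divergence_sequence_for_sectors sectors (divergence_sequence_for_sectors sectors)

-- ===== LEMMAS AND PROOFS =====

-- ---- A's loop: positional merge of one sector's reversed pair-list into the accumulator ----
def zipExt : List (List Int) → List (List Int) → List (List Int)
  | [], r => r
  | a :: s, [] => a :: s
  | a :: s, b :: r => (a ++ b) :: zipExt s r

theorem zipExt_nil_right (s : List (List Int)) : zipExt s [] = s := by
  cases s <;> rfl

theorem foldl_dsStep_eq_zipExt (row : List (List Int)) :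
    ∀ (seq : List (List Int)) (k : Nat), k ≤ seq.length →
    (PySem.List.enumerate row (k : Int)).foldl dsStep seq
      = seq.take k ++ zipExt (seq.drop k) row := by
  induction row with
  | nil =>
      intro seq k hk
      simp [PySem.List.enumerate_nil, zipExt_nil_right]
  | cons b row ih =>
      intro seq k hk
      rw [PySem.List.enumerate_cons, List.foldl_cons]
      have hcast : (k : Int) + 1 = ((k + 1 : Nat) : Int) := by push_cast; ring
      by_cases h : k < seq.length
      · have hstep : dsStep seq ((k : Int), b) = seq.set k (seq[k] ++ b) := by
          simp [dsStep, h]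
        rw [hstep, hcast, ih _ (k + 1) (by simpa using Nat.succ_le_of_lt h)]
        rw [List.set_eq_take_append_cons_drop, if_pos h]
        have hlen : (seq.take k).length = k := List.length_take_of_le (le_of_lt h)
        rw [List.take_append, List.drop_append, hlen]
        have h1 : (seq.take k).take (k+1) = seq.take k := by
          apply List.take_of_length_le; omega
        have h2 : (seq.take k).drop (k+1) = [] := by
          apply List.drop_eq_nil_of_le; omega
        rw [h1, h2]
        have h3 : k + 1 - k = 1 := by omega
        rw [h3]
        have hdk : seq.drop k = seq[k] :: seq.drop (k+1) := List.drop_eq_getElem_cons h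
        rw [hdk]
        simp [zipExt]
      · have hke : k = seq.length := by omega
        have hstep : dsStep seq ((k : Int), b) = seq ++ [b] := by
          simp [dsStep, h]
        rw [hstep, hcast, ih _ (k + 1) (by simp [hke])]
        have h1 : (seq ++ [b]).take (k+1) = seq ++ [b] := by
          apply List.take_of_length_le; simp [hke]
        have h2 : (seq ++ [b]).drop (k+1) = [] := by
          apply List.drop_eq_nil_of_le; simp [hke]
        rw [h1, h2]
        have h3 : seq.take k = seq := by apply List.take_of_length_le; omega
        have h4 : seq.drop k = [] := by apply List.drop_eq_nil_of_le; omega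
        rw [h3, h4]
        simp [zipExt]

theorem zipExt_getD (s r : List (List Int)) (j : Nat) :
    (zipExt s r).getD j [] = s.getD j [] ++ r.getD j [] := by
  induction s generalizing r j with
  | nil => cases r <;> simp [zipExt]
  | cons a s ih =>
      cases r with
      | nil => simp [zipExt]
      | cons b r =>
          cases j with
          | zero => simp [zipExt]
          | succ j => simpa [zipExt] using ih r j

theorem zipExt_length (s r : List (List Int)) :
    (zipExt s r).length = max s.length r.length := by
  induction s generalizing r with
  | nil => cases r <;> simp [zipExt]
  | cons a s ih =>
      cases r with
      | nil => simp [zipExt]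
      | cons b r => simp [zipExt, ih]

theorem foldl_zipExt_getD (rows : List (List (List Int))) :
    ∀ (seq : List (List Int)) (j : Nat),
    (rows.foldl zipExt seq).getD j []
      = seq.getD j [] ++ (rows.filterMap (fun r => r[j]?)).flatten := by
  induction rows with
  | nil => intro seq j; simp
  | cons r rows ih =>
      intro seq j
      rw [List.foldl_cons, ih, zipExt_getD]
      rcases hr : r[j]? with _ | x
      · simp [hr]
      · simp [hr]

theorem foldl_zipExt_length (rows : List (List (List Int))) :
    ∀ (seq : List (List Int)),
    (rows.foldl zipExt seq).length = rows.foldl (fun m r => max m r.length) seq.length := by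
  induction rows with
  | nil => intro seq; simp
  | cons r rows ih =>
      intro seq
      rw [List.foldl_cons, ih, zipExt_length, List.foldl_cons]

-- the transpose identity: mapped-sorted fold of zipExt = column construction
theorem foldl_zipExt_eq_columns (rows : List (List (List Int))) :
    (rows.foldl zipExt []).map (fun l => PySem.List.sorted l (fun x => x) false)
      = (List.range ((rows.map List.length).foldl max 0)).map (fun j =>
          PySem.List.sorted ((rows.filterMap (fun r => r[j]?)).flatten) (fun x => x) false) := by
  have hm : (rows.foldl zipExt []).length = (rows.map List.length).foldl max 0 := by
    rw [foldl_zipExt_length, List.foldl_map]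
    rfl
  apply List.ext_getElem
  · simp [hm]
  · intro j hj1 hj2
    simp only [List.getElem_map, List.getElem_range]
    congr 1
    have hjF : j < (rows.foldl zipExt []).length := by simpa using hj1
    have h := foldl_zipExt_getD rows [] j
    rw [List.getD_eq_getElem?_getD, List.getElem?_eq_getElem hjF] at h
    simpa using h

-- ---- Python's lexicographic tuple order, and what sorted() returns for it ----
def lexLE (a b : Int × Int) : Prop := a.1 < b.1 ∨ (a.1 = b.1 ∧ a.2 ≤ b.2)

def blex (a b : Int × Int) : Bool :=
  decide (a.1 < b.1) || (!decide (b.1 < a.1) && decide (a.2 < b.2))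

theorem not_blex_iff (a b : Int × Int) : blex b a = false ↔ lexLE a b := by
  simp [blex, lexLE]; omega

theorem blex_imp_lexLE (a b : Int × Int) (h : blex a b = true) : lexLE a b := by
  simp [blex, lexLE] at *; omega

theorem lexLE_trans (a b c : Int × Int) (h1 : lexLE a b) (h2 : lexLE b c) : lexLE a c := by
  simp [lexLE] at *; omega

theorem lexLE_antisymm (a b : Int × Int) (h1 : lexLE a b) (h2 : lexLE b a) : a = b := by
  obtain ⟨x, y⟩ := a; obtain ⟨z, w⟩ := b
  simp [lexLE] at *; omega

theorem insertBy_blex_pairwise (x : Int × Int) (acc : List (Int × Int))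
    (h : acc.Pairwise lexLE) : (PySem.List.insertBy blex x acc).Pairwise lexLE := by
  induction acc with
  | nil => simp [PySem.List.insertBy]
  | cons y ys ih =>
      rw [List.pairwise_cons] at h
      by_cases hb : blex x y = true
      · rw [show PySem.List.insertBy blex x (y :: ys) = x :: y :: ys from by
            simp [PySem.List.insertBy, hb]]
        refine List.Pairwise.cons ?_ (List.Pairwise.cons h.1 h.2)
        intro z hz
        rcases List.mem_cons.mp hz with rfl | hz
        · exact blex_imp_lexLE _ _ hb
        · exact lexLE_trans _ _ _ (blex_imp_lexLE _ _ hb) (h.1 z hz)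
      · rw [show PySem.List.insertBy blex x (y :: ys) = y :: PySem.List.insertBy blex x ys from by
            simp [PySem.List.insertBy, hb]]
        refine List.Pairwise.cons ?_ (ih h.2)
        intro z hz
        rw [PySem.List.mem_insertBy] at hz
        rcases hz with rfl | hz
        · exact (not_blex_iff y z).mp (Bool.eq_false_iff.mpr hb)
        · exact h.1 z hz

theorem sorted2_pairwise_lex (xs : List (Int × Int)) :
    (PySem.List.sorted2 xs (fun t => t.1) (fun t => t.2) false).Pairwise lexLE := by
  rw [show PySem.List.sorted2 xs (fun t => t.1) (fun t => t.2) false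
      = xs.foldl (fun acc x => PySem.List.insertBy blex x acc) [] from rfl]
  generalize hacc : ([] : List (Int × Int)) = acc
  have h : acc.Pairwise lexLE := by rw [← hacc]; simp
  clear hacc
  induction xs generalizing acc with
  | nil => simpa using h
  | cons x xs ih => exact ih _ (insertBy_blex_pairwise x acc h)

-- NAME the sorted order: any lexicographically nondecreasing rearrangement IS sorted(xs)
theorem sorted2_eq_of_perm_of_pairwise (xs ys : List (Int × Int))
    (hperm : ys.Perm xs) (hp : ys.Pairwise lexLE) :
    PySem.List.sorted2 xs (fun t => t.1) (fun t => t.2) false = ys := by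
  exact List.Perm.eq_of_pairwise
    (fun a b _ _ h1 h2 => lexLE_antisymm a b h1 h2)
    (sorted2_pairwise_lex xs) hp
    ((PySem.List.sorted2_perm xs _ _ false).trans hperm.symm)

-- ---- groupby over a flatten of nonempty constant-key blocks with increasing keys ----
theorem span_split (p : Int × Int → Bool) (xs ys : List (Int × Int))
    (hx : ∀ a ∈ xs, p a = true) (hy : ∀ a ∈ ys, p a = false) :
    (List.span p (xs ++ ys)).1 = xs ∧ (List.span p (xs ++ ys)).2 = ys := by
  have htx : List.takeWhile p xs = xs := List.takeWhile_eq_self_iff.mpr hx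
  have hty : List.takeWhile p ys = [] := by
    rw [List.takeWhile_eq_nil_iff]
    intro hl hp
    exact absurd (hy _ (List.get_mem ys ⟨0, hl⟩)) (by simpa using hp)
  have hdx : List.dropWhile p xs = [] := by
    have := List.takeWhile_append_dropWhile (p := p) (l := xs)
    rw [htx] at this
    simpa using this
  have hdy : List.dropWhile p ys = ys := by
    have := List.takeWhile_append_dropWhile (p := p) (l := ys)
    rw [hty] at this
    simpa using this
  simp only [List.span_eq_takeWhile_dropWhile]
  constructor
  · rw [List.takeWhile_append, if_pos (by rw [htx]), hty, List.append_nil]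
  · rw [List.dropWhile_append, if_pos (by rw [hdx]; rfl), hdy]

theorem pyGroupRuns_flatten (bs : List (List (Int × Int)))
    (hne : ∀ b ∈ bs, b ≠ [])
    (hconst : ∀ b ∈ bs, ∀ x ∈ b, ∀ y ∈ b, x.1 = y.1)
    (hsort : bs.Pairwise (fun b c => ∀ x ∈ b, ∀ y ∈ c, x.1 < y.1)) :
    pyGroupRuns bs.flatten = bs := by
  induction bs with
  | nil => simp [pyGroupRuns]
  | cons b bs ih =>
      rw [List.pairwise_cons] at hsort
      obtain ⟨x, xs, rfl⟩ : ∃ x xs, b = x :: xs := by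
        cases b with
        | nil => exact absurd rfl (hne [] (by simp))
        | cons x xs => exact ⟨x, xs, rfl⟩
      rw [List.flatten_cons, List.cons_append]
      rw [pyGroupRuns]
      obtain ⟨hs1, hs2⟩ := span_split (fun y => y.1 == x.1) xs bs.flatten
        (by intro a ha
            have := hconst (x :: xs) (by simp) a (by simp [ha]) x (by simp)
            simpa using this)
        (by intro a ha
            rw [List.mem_flatten] at ha
            obtain ⟨c, hc, hac⟩ := ha
            have := hsort.1 c hc x (by simp) a hac
            simp; omega)
      rw [hs1, hs2]
      rw [ih (fun c hc => hne c (by simp [hc]))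
        (fun c hc => hconst c (by simp [hc]))
        hsort.2]

-- ---- the tagged multiset: per-sector tags are exactly the per-column tags ----
theorem flatten_map_append_perm (js : List Nat) (A B : Nat → List (Int × Int)) :
    ((js.map (fun j => A j ++ B j)).flatten).Perm ((js.map A).flatten ++ (js.map B).flatten) := by
  induction js with
  | nil => simp
  | cons j js ih =>
      simp only [List.map_cons, List.flatten_cons]
      have h1 : ((A j ++ B j) ++ (js.map (fun j => A j ++ B j)).flatten).Perm
          ((A j ++ B j) ++ ((js.map A).flatten ++ (js.map B).flatten)) := ih.append_left _
      have h2 : (B j ++ ((js.map A).flatten ++ (js.map B).flatten)).Perm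
          ((js.map A).flatten ++ (B j ++ (js.map B).flatten)) := by
        rw [← List.append_assoc, ← List.append_assoc]
        exact List.perm_append_comm.append_right _
      have h3 : ((A j ++ B j) ++ ((js.map A).flatten ++ (js.map B).flatten)).Perm
          ((A j ++ (js.map A).flatten) ++ (B j ++ (js.map B).flatten)) := by
        simp only [List.append_assoc]
        exact h2.append_left _
      exact h1.trans h3

theorem flatten_map_perm_of_perm (js : List Nat) (A B : Nat → List (Int × Int))
    (h : ∀ j ∈ js, (A j).Perm (B j)) :
    ((js.map A).flatten).Perm ((js.map B).flatten) := by
  induction js with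
  | nil => simp
  | cons j js ih =>
      simp only [List.map_cons, List.flatten_cons]
      exact (h j (by simp)).append (ih (fun a ha => h a (by simp [ha])))

theorem tagSector_eq (r : List (List Int)) (M : Nat) (hM : r.length ≤ M) :
    (PySem.List.enumerate r 0).flatMap (fun jp => jp.2.map (fun v => (jp.1, v)))
      = ((List.range M).map (fun (j : Nat) =>
          ((r[j]?.getD ([] : List Int)).map (fun v => ((j : Int), v))))).flatten := by
  rw [PySem.List.enumerate_eq_map_pyRange (d := [])]
  have hlen : PySem.List.len r = (r.length : Int) := by simp [PySem.List.len]
  rw [hlen, PySem.List.pyRange_zero_natCast]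
  obtain ⟨k, hk⟩ : ∃ k, M = r.length + k := ⟨M - r.length, by omega⟩
  subst hk
  rw [List.range_add, List.map_append, List.flatten_append]
  have h2 : (((List.range k).map (fun x => r.length + x)).map
      (fun (j : Nat) => ((r[j]?.getD ([] : List Int)).map (fun v => ((j : Int), v))))).flatten
      = [] := by
    rw [List.flatten_eq_nil_iff]
    intro l hl
    rw [List.map_map, List.mem_map] at hl
    obtain ⟨x, _, rfl⟩ := hl
    simp only [Function.comp]
    rw [List.getElem?_eq_none (by omega)]
    rfl
  rw [h2, List.append_nil]
  rw [List.flatMap_def, List.map_map]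
  congr 1
  rw [List.map_map]
  apply List.map_congr_left
  intro j hj
  simp only [Function.comp]
  rw [PySem.List.pyGetD_natCast, List.getD_eq_getElem?_getD]

theorem tagged_perm (rows : List (List (List Int))) (M : Nat) (hM : ∀ r ∈ rows, r.length ≤ M) :
    (rows.flatMap (fun r => (PySem.List.enumerate r 0).flatMap
        (fun jp => jp.2.map (fun v => (jp.1, v))))).Perm
      (((List.range M).map (fun (j : Nat) =>
        (((rows.filterMap (fun r => r[j]?)).flatten).map (fun v => ((j : Int), v))))).flatten) := by
  induction rows with
  | nil =>
      have h0 : (((List.range M).map (fun (j : Nat) =>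
          ((((List.filterMap (fun r => r[j]?) ([] : List (List (List Int))))).flatten).map
            (fun v => ((j : Int), v))))).flatten) = [] := by
        rw [List.flatten_eq_nil_iff]
        intro l hl
        rw [List.mem_map] at hl
        obtain ⟨x, _, rfl⟩ := hl
        simp
      rw [List.flatMap_nil, h0]
  | cons r rows ih =>
      rw [List.flatMap_cons]
      have hrw : ((List.range M).map (fun (j : Nat) =>
          (((((r :: rows).filterMap (fun r => r[j]?))).flatten).map (fun v => ((j : Int), v)))))
          = (List.range M).map (fun (j : Nat) =>
            ((r[j]?.getD ([] : List Int)).map (fun v => ((j : Int), v)))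
              ++ ((((rows.filterMap (fun r => r[j]?))).flatten).map (fun v => ((j : Int), v)))) := by
        apply List.map_congr_left
        intro j _
        rw [List.filterMap_cons]
        cases hr : r[j]? with
        | none => simp
        | some c => simp
      rw [hrw]
      refine List.Perm.trans ?_ (flatten_map_append_perm (List.range M) _ _).symm
      rw [tagSector_eq r M (hM r (by simp))]
      exact List.Perm.append_left _ (ih (fun a ha => hM a (by simp [ha])))

-- ---- nonemptiness of every column below the accumulator's final length ----
theorem pairsFromList_ne_nil (l : List Int) : ∀ x ∈ pairsFromList l, x ≠ [] := by
  intro x hx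
  unfold pairsFromList at hx
  by_cases h : (l.length % 2 == 1) = true
  · simp only [h, if_pos] at hx
    by_cases hc : l.getD (l.length / 2) 0 ≠ 0
    · rw [if_pos hc] at hx
      rcases List.mem_append.mp hx with hx | hx
      · obtain ⟨p, _, rfl⟩ := List.mem_map.mp hx
        simp
      · rw [List.mem_singleton] at hx
        subst hx
        simp
    · rw [if_neg hc] at hx
      obtain ⟨p, _, rfl⟩ := List.mem_map.mp hx
      simp
  · simp only [h] at hx
    obtain ⟨p, _, rfl⟩ := List.mem_map.mp hx
    simp

theorem cols_ne_nil (rows : List (List (List Int)))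
    (hcell : ∀ r ∈ rows, ∀ c ∈ r, c ≠ ([] : List Int)) (j : Nat)
    (hj : j < (rows.map List.length).foldl max 0) :
    ((rows.filterMap (fun r => r[j]?)).flatten) ≠ [] := by
  rcases PySem.List.foldl_max_mem (rows.map List.length) 0 with h0 | hmem
  · omega
  · obtain ⟨r, hr, hlen⟩ := List.mem_map.mp hmem
    have hjr : j < r.length := by omega
    intro hflat
    rw [List.flatten_eq_nil_iff] at hflat
    have hcmem : r[j] ∈ rows.filterMap (fun r => r[j]?) :=
      List.mem_filterMap.mpr ⟨r, hr, by rw [List.getElem?_eq_getElem hjr]⟩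
    exact hcell r hr r[j] (List.getElem_mem hjr) (hflat _ hcmem)

-- ---- B's pipeline evaluated against the column construction ----
theorem altB_eq_columns (sectors : List (List Int)) :
    divergence_sequence_for_sectors_alt sectors
      = (List.range (((sectors.map (fun s => (pairsFromList s).reverse)).map List.length).foldl max 0)).map
          (fun j => PySem.List.sorted
            (((sectors.map (fun s => (pairsFromList s).reverse)).filterMap (fun r => r[j]?)).flatten)
            (fun x => x) false) := by
  unfold divergence_sequence_for_sectors_alt
  simp only []
  set rows := sectors.map (fun s => (pairsFromList s).reverse) with hrows
  set m := ((rows.map List.length).foldl max 0) with hm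
  set cols := fun (j : Nat) => ((rows.filterMap (fun r => r[j]?)).flatten) with hcols
  set blocks := (List.range m).map
    (fun (j : Nat) => (PySem.List.sorted (cols j) (fun x => x) false).map
      (fun v => ((j : Int), v))) with hblocks
  have hMbound : ∀ r ∈ rows, r.length ≤ m :=
    fun r hr => (PySem.List.le_foldl_max (rows.map List.length) 0).2 _ (List.mem_map_of_mem hr)
  have hcell : ∀ r ∈ rows, ∀ c ∈ r, c ≠ ([] : List Int) := by
    intro r hr c hc
    obtain ⟨s, _, rfl⟩ := List.mem_map.mp hr
    exact pairsFromList_ne_nil s c (List.mem_reverse.mp hc)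
  have htagarg : sectors.flatMap (fun sector =>
        (PySem.List.enumerate (pairsFromList sector).reverse 0).flatMap (fun jp =>
          jp.2.map (fun light => (jp.1, light))))
      = rows.flatMap (fun r => (PySem.List.enumerate r 0).flatMap
          (fun jp => jp.2.map (fun v => (jp.1, v)))) := by
    rw [hrows, List.flatMap_map]
  have hperm : blocks.flatten.Perm (sectors.flatMap (fun sector =>
        (PySem.List.enumerate (pairsFromList sector).reverse 0).flatMap (fun jp =>
          jp.2.map (fun light => (jp.1, light))))) := by
    rw [htagarg]
    refine List.Perm.trans ?_ (tagged_perm rows m hMbound).symm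
    exact flatten_map_perm_of_perm (List.range m) _ _
      (fun j _ => (PySem.List.sorted_perm (cols j) (fun x => x) false).map _)
  have hpair : blocks.flatten.Pairwise lexLE := by
    rw [List.pairwise_flatten]
    constructor
    · intro b hb
      obtain ⟨j, _, rfl⟩ := List.mem_map.mp hb
      exact List.Pairwise.map _
        (fun a b (hab : a ≤ b) => Or.inr ⟨rfl, hab⟩)
        (PySem.List.sorted_pairwise (cols j) (fun x => x))
    · rw [hblocks]
      refine List.Pairwise.map _ ?_ List.pairwise_lt_range
      intro a b hab x hx y hy
      obtain ⟨_, _, rfl⟩ := List.mem_map.mp hx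
      obtain ⟨_, _, rfl⟩ := List.mem_map.mp hy
      exact Or.inl (by simp only []; exact_mod_cast hab)
  rw [sorted2_eq_of_perm_of_pairwise _ blocks.flatten hperm hpair]
  rw [pyGroupRuns_flatten blocks
    (by intro b hb
        obtain ⟨j, hj, rfl⟩ := List.mem_map.mp hb
        rw [Ne, List.map_eq_nil_iff, PySem.List.sorted_eq_nil_iff]
        exact cols_ne_nil rows hcell j (List.mem_range.mp hj))
    (by intro b hb x hx y hy
        obtain ⟨j, _, rfl⟩ := List.mem_map.mp hb
        obtain ⟨_, _, rfl⟩ := List.mem_map.mp hx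
        obtain ⟨_, _, rfl⟩ := List.mem_map.mp hy
        rfl)
    (by rw [hblocks]
        refine List.Pairwise.map _ ?_ List.pairwise_lt_range
        intro a b hab x hx y hy
        obtain ⟨_, _, rfl⟩ := List.mem_map.mp hx
        obtain ⟨_, _, rfl⟩ := List.mem_map.mp hy
        simp only []
        exact_mod_cast hab)]
  rw [hblocks, List.map_map]
  apply List.map_congr_left
  intro j _
  simp only [Function.comp, List.map_map]
  rw [show ((fun (t : Int × Int) => t.2) ∘ (fun v => ((j : Int), v))) = id from rfl, List.map_id]

-- ===== VERDICT (by name: the statement is the Claim_ definition above) =====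
theorem divergence_sequence_for_sectors_spec : Claim_equal_divergence_sequence_for_sectors := by
  intro sectors _
  show divergence_sequence_for_sectors sectors = divergence_sequence_for_sectors_alt sectors
  unfold divergence_sequence_for_sectors
  simp only []
  have hstep : ∀ (seq items : List (List Int)),
      (PySem.List.enumerate items.reverse 0).foldl dsStep seq = zipExt seq items.reverse := by
    intro seq items
    have h0 := foldl_dsStep_eq_zipExt items.reverse seq 0 (Nat.zero_le _)
    simpa using h0
  have hfoldA : (sectors.map pairsFromList).foldl
      (fun seq items => (PySem.List.enumerate items.reverse 0).foldl dsStep seq) []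
      = (sectors.map (fun s => (pairsFromList s).reverse)).foldl zipExt [] := by
    rw [List.foldl_map, List.foldl_map]
    apply PySem.List.foldl_congr_mem
    intro acc x _
    exact hstep acc (pairsFromList x)
  rw [hfoldA, foldl_zipExt_eq_columns, altB_eq_columns]
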